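-- pv_equiv track=rewrite | github.com/1-Liam/DENSN-Atlas | fixtures/protocol_guard/train/validator.py | validate_trace
-- ===== SOURCE A (Python) =====
-- def validate_trace(events):
--     """
--     Buggy reference implementation: it remembers only that BEGIN happened once.
--     It does not model the hidden guard-active state correctly after END.
--     """
--     saw_begin = False
--     for event in events:
--         if event == "BEGIN":
--             saw_begin = True
--         elif event == "END":
--             if not saw_begin:
--                 return False
--         elif event == "WRITE" and not saw_begin:
--             return False
--         else:
--             return False
--     return True
-- ===== SOURCE B (Python) =====
-- def validate_trace(events):
--     events = list(events)
--     if not events: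
--         return True
--     if events[0] != "BEGIN":
--         return False
--     return all(e in ("BEGIN", "END") for e in events)
-- ===== Notes on version B (the rewrite author's own statement) =====
-- stated objective: simpler
-- what changed: Replaces the running saw_begin state machine with a positional check (first event must be BEGIN) plus one membership sweep over {BEGIN,END}, using the fact that in A the guard, once opened, stays open forever.
import Mathlib
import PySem

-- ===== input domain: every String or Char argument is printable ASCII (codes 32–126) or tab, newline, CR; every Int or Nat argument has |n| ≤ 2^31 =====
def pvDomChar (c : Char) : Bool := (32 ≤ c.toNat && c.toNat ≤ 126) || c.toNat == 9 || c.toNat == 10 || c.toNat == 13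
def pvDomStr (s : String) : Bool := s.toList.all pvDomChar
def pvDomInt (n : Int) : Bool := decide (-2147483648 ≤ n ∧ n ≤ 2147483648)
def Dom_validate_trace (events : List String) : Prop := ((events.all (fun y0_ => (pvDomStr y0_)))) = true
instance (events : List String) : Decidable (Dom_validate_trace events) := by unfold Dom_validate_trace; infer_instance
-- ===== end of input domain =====

-- B replaces A's running saw_begin state machine with a first-event check plus one
-- membership sweep over {BEGIN,END} (once A's guard opens it never closes), same result.

-- ===== PORT A =====
-- literal transliteration of A's for-loop with early returns, state saw_begin
def validate_trace_go (saw_begin : Bool) : List String → Bool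
  | [] => true
  | event :: rest =>
    if event == "BEGIN" then validate_trace_go true rest
    else if event == "END" then
      if !saw_begin then false else validate_trace_go saw_begin rest
    else if event == "WRITE" && !saw_begin then false
    else false

def validate_trace (events : List String) : Bool :=
  validate_trace_go false events

-- ===== PORT B =====
def validate_trace_alt (events : List String) : Bool :=
  match events with
  | [] => true
  | e0 :: _ =>
    if e0 != "BEGIN" then false
    else events.all (fun e => e == "BEGIN" || e == "END")

-- ===== PRECONDITION & SPEC =====
def Spec_validate_trace (events : List String) (out : Bool) : Prop :=
  out = validate_trace_alt events
instance (events : List String) (out : Bool) : Decidable (Spec_validate_trace events out) := by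
  unfold Spec_validate_trace; infer_instance

-- ===== CLAIM =====
def Claim_equal_validate_trace : Prop :=
  ∀ (events : List String), Dom_validate_trace events → Spec_validate_trace events (validate_trace events)

-- ===== LEMMAS AND PROOFS =====
-- once the guard is open, A accepts exactly the BEGIN/END-only suffixes
lemma go_true (l : List String) :
    validate_trace_go true l = l.all (fun e => e == "BEGIN" || e == "END") := by
  induction l with
  | nil => rfl
  | cons e rest ih =>
    simp only [validate_trace_go, List.all_cons]
    by_cases hb : e = "BEGIN"
    · simp [hb, ih]
    · by_cases he : e = "END"
      · simp [he, ih]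
      · simp [hb, he]

-- ===== VERDICT =====
theorem validate_trace_spec : Claim_equal_validate_trace := by
  intro events _
  unfold Spec_validate_trace
  cases events with
  | nil => rfl
  | cons e0 rest =>
    by_cases h0 : e0 = "BEGIN"
    · subst h0
      simp only [validate_trace, validate_trace_go, beq_self_eq_true, if_true, go_true,
        validate_trace_alt, bne_self_eq_false, Bool.false_eq_true, if_false, List.all_cons]
      simp
    · by_cases he : e0 = "END"
      · simp [validate_trace, validate_trace_go, validate_trace_alt, he]
      · simp [validate_trace, validate_trace_go, validate_trace_alt, h0, he]
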